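-- pv_equiv track=rewrite | github.com/FrancescoRomeo02/UniversityNotes | [01]LT_21-22/SEM2/ASD/Exercises/D&I/right_shift.py | r_shift
-- ===== SOURCE A (Python) =====
-- def r_shift(a,i,f):
--     if(f<i):
--         return 0
--     elif(i==f):
--         return a
--     elif(i==f-1):
--         a[f]=a[i]
--         a[i]=a[len(a)-1-i]
--     else:
--         m=(i+f)//2
--         r_shift(a,i,m)
--         r_shift(a,m+1,f)
--
--     return a
--
-- a = [8, 3, 10, 7]
-- ===== SOURCE B (Python) =====
-- def r_shift(a, i, f):
--     if f < i:
--         return 0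
--     stack = [(i, f)]
--     while stack:
--         p, q = stack.pop()
--         if q - p >= 2:
--             m = (p + q) // 2
--             stack.append((m + 1, q))
--             stack.append((p, m))
--         elif q - p == 1:
--             a[q] = a[p]
--             a[p] = a[len(a) - 1 - p]
--     return a
-- ===== Notes on version B (the rewrite author's own statement) =====
-- stated objective: alternative
-- what changed: Replaces the divide-and-conquer recursion with an iterative explicit-stack traversal (pop a segment; push right half then left half, so segments are processed left-to-right) performing the same two writes at each size-2 leaf; the top-level base case 'return 0 on an empty range' is kept.
-- outside the precondition, e.g. on r_shift([1, 2, 3], 2, 1): A returns 0, B returns 0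
import Mathlib
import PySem

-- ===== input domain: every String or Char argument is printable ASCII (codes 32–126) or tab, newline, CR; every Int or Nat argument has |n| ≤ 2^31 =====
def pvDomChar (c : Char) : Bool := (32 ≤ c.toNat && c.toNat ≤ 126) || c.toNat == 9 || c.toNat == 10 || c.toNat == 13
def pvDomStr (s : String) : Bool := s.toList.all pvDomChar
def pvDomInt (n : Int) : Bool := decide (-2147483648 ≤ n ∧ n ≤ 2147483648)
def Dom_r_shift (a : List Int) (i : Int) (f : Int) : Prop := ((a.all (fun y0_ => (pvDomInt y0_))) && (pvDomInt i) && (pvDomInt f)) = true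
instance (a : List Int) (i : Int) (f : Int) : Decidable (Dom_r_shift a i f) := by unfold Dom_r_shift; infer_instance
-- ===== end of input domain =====

-- B replaces A's divide-and-conquer recursion by an iterative explicit-stack traversal with the
-- same leaf writes and the same return-0-on-empty-range base case (alternative decomposition, not
-- faster); both Pythons mutate `a` in place and the equivalence proved here is about the RETURN
-- value (the in-place writes happen to coincide too).


-- ===== PORT A =====
-- the recursive body of A acting on the list state, with a fuel guard that only makes the
-- recursion total (r_shift supplies fuel (f-i).toNat + 1, which is never exhausted); the
-- `f < i` branch returns with the state unchanged (Python returns 0 there, which every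
-- recursive caller ignores)
def r_shift_go : Nat → List Int → Int → Int → List Int
  | 0, a, _, _ => a
  | n + 1, a, i, f =>
    if f < i then a
    else if i = f then a
    else if i = f - 1 then
      -- a[f] = a[i]; a[i] = a[len(a)-1-i]   (the second read sees the first write; exact under
      -- Pre_, where every index is in range — pySetD/pyGetD are Python-exact there)
      let a1 := PySem.List.pySetD a f (PySem.List.pyGetD a i 0)
      PySem.List.pySetD a1 i (PySem.List.pyGetD a1 ((a1.length : Int) - 1 - i) 0)
    else
      -- m = (i+f)//2, inlined at its two uses
      r_shift_go n (r_shift_go n a i (PySem.Int.floordiv (i + f) 2)) (PySem.Int.floordiv (i + f) 2 + 1) f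

-- Python's top level `return 0` when f < i is an int, not a list (excluded by Pre_): [] stands in
def r_shift (a : List Int) (i : Int) (f : Int) : List Int :=
  if f < i then [] else r_shift_go ((f - i).toNat + 1) a i f

-- ===== PORT B =====
-- the while-loop over the explicit stack, with a fuel guard that only makes the loop total
-- (r_shift_alt supplies fuel 2*(f-i).toNat + 2, an iteration bound that is never exhausted)
def r_shift_loop : Nat → List Int → List (Int × Int) → List Int
  | 0, a, _ => a
  | _ + 1, a, [] => a
  | n + 1, a, (p, q) :: rest =>
    if 2 ≤ q - p then
      -- m = (p+q)//2, inlined at its two uses; left half pushed last, so popped first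
      r_shift_loop n a ((p, PySem.Int.floordiv (p + q) 2) :: (PySem.Int.floordiv (p + q) 2 + 1, q) :: rest)
    else if q - p = 1 then
      let a1 := PySem.List.pySetD a q (PySem.List.pyGetD a p 0)
      r_shift_loop n (PySem.List.pySetD a1 p (PySem.List.pyGetD a1 ((a1.length : Int) - 1 - p) 0)) rest
    else
      r_shift_loop n a rest

-- B's top level `return 0` when f < i is an int, not a list (excluded by Pre_): [] stands in
def r_shift_alt (a : List Int) (i : Int) (f : Int) : List Int :=
  if f < i then [] else r_shift_loop (2 * (f - i).toNat + 2) a [(i, f)]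

-- ===== PRECONDITION & SPEC =====
-- Pre_ is exactly the set of inputs on which Python A returns a LIST: it excludes (a) f < i,
-- where both Pythons return the int 0 — a value outside the declared return type — and (b) the
-- inputs on which A's leaf writes raise IndexError (negative i with i < f, or f beyond len(a),
-- except for the f = len(a) shapes whose rightmost leaf is a lone singleton, characterised by
-- f - i ∈ [3*2^k - 1, 4*2^k - 2] for some k ≥ 0; writing n = f - i + 1, that is exactly
-- n ∈ [3*2^k, 4*2^k - 1], i.e. the top two binary digits of n are '11': n ≥ 3 and
-- n / 2^(log2 n - 1) = 3 — a closed form with no existential and no size bound).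
def Pre_r_shift (a : List Int) (i : Int) (f : Int) : Prop :=
  i = f ∨ (0 ≤ i ∧ i < f ∧
    (f < (a.length : Int) ∨
      (f = (a.length : Int) ∧
        3 ≤ (f - i).toNat + 1 ∧
        ((f - i).toNat + 1) / 2 ^ (Nat.log2 ((f - i).toNat + 1) - 1) = 3)))
instance (a : List Int) (i : Int) (f : Int) : Decidable (Pre_r_shift a i f) := by
  unfold Pre_r_shift; infer_instance

def pvWitness_r_shift : List Int × Int × Int := ([8, 3, 10, 7], 0, 3)

def Spec_r_shift (a : List Int) (i : Int) (f : Int) (out : List Int) : Prop := out = r_shift_alt a i f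
instance (a : List Int) (i : Int) (f : Int) (out : List Int) : Decidable (Spec_r_shift a i f out) := by unfold Spec_r_shift; infer_instance

-- ===== CLAIM (what is proved, stated in full; the proofs are below) =====
def Claim_equal_r_shift : Prop := ∀ (a : List Int) (i : Int) (f : Int), Dom_r_shift a i f → Pre_r_shift a i f → Spec_r_shift a i f (r_shift a i f)

-- ===== LEMMAS AND PROOFS =====

-- every segment on the stack is non-empty (p ≤ q); B's loop only ever pushes such segments
def stkGood (st : List (Int × Int)) : Prop := ∀ pq ∈ st, pq.1 ≤ pq.2

-- an upper bound on the number of loop iterations left: each pop lowers it by at least 1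
def stkV (st : List (Int × Int)) : Nat :=
  (st.map (fun pq => 2 * (pq.2 - pq.1 + 1).toNat - 1)).sum

theorem stkV_nil : stkV [] = 0 := by simp [stkV]

theorem stkV_cons (p q : Int) (tl : List (Int × Int)) :
    stkV ((p, q) :: tl) = 2 * (q - p + 1).toNat - 1 + stkV tl := by simp [stkV]

-- A's recursion does not depend on the fuel, as long as the fuel exceeds (q-p).toNat
theorem go_congr (k : Nat) : ∀ (p q : Int), (q - p).toNat = k →
    ∀ (n1 n2 : Nat) (a : List Int), k < n1 → k < n2 →
    r_shift_go n1 a p q = r_shift_go n2 a p q := by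
  induction k using Nat.strong_induction_on with
  | _ k ih =>
    intro p q hk n1 n2 a h1 h2
    cases n1 with
    | zero => omega
    | succ x =>
      cases n2 with
      | zero => omega
      | succ y =>
        simp only [r_shift_go]
        by_cases hqp : q < p
        · simp [hqp]
        · by_cases hpq : p = q
          · simp [hpq]
          · by_cases hp1 : p = q - 1
            · simp [hp1]
            · have hm : PySem.Int.floordiv (p + q) 2 = (p + q) / 2 :=
                PySem.Int.floordiv_eq_ediv_of_pos (by omega)
              simp only [if_neg hqp, if_neg hpq, if_neg hp1, hm]
              have e1 : r_shift_go x a p ((p + q) / 2) = r_shift_go y a p ((p + q) / 2) :=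
                ih ((p + q) / 2 - p).toNat (by omega) p ((p + q) / 2) rfl x y a (by omega) (by omega)
              rw [e1]
              exact ih (q - ((p + q) / 2 + 1)).toNat (by omega) ((p + q) / 2 + 1) q rfl x y _
                (by omega) (by omega)

-- B's loop does not depend on the fuel either, as long as the fuel exceeds stkV
theorem loop_congr (N : Nat) : ∀ (st : List (Int × Int)), stkV st = N → stkGood st →
    ∀ (n1 n2 : Nat) (a : List Int), N < n1 → N < n2 →
    r_shift_loop n1 a st = r_shift_loop n2 a st := by
  induction N using Nat.strong_induction_on with
  | _ N ih =>
    intro st hN hg n1 n2 a h1 h2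
    cases n1 with
    | zero => omega
    | succ x =>
      cases n2 with
      | zero => omega
      | succ y =>
        cases st with
        | nil => simp only [r_shift_loop]
        | cons hd tl =>
          obtain ⟨p, q⟩ := hd
          have hpq : p ≤ q := hg (p, q) (by simp)
          rw [stkV_cons] at hN
          simp only [r_shift_loop]
          by_cases hs : 2 ≤ q - p
          · have hm : PySem.Int.floordiv (p + q) 2 = (p + q) / 2 :=
              PySem.Int.floordiv_eq_ediv_of_pos (by omega)
            simp only [if_pos hs, hm]
            have hV' : stkV ((p, (p + q) / 2) :: ((p + q) / 2 + 1, q) :: tl) = N - 1 := by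
              rw [stkV_cons, stkV_cons]
              omega
            refine ih (N - 1) (by omega) _ hV' ?_ x y a (by omega) (by omega)
            intro pq hmem
            obtain ⟨u, v⟩ := pq
            simp only [List.mem_cons, Prod.mk.injEq] at hmem
            rcases hmem with ⟨hu, hv⟩ | ⟨hu, hv⟩ | h
            · show u ≤ v; omega
            · show u ≤ v; omega
            · exact hg (u, v) (List.mem_cons_of_mem _ h)
          · by_cases h1' : q - p = 1
            · simp only [if_neg hs, if_pos h1']
              exact ih (stkV tl) (by omega) tl rfl
                (fun pq h => hg pq (List.mem_cons_of_mem _ h)) x y _ (by omega) (by omega)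
            · simp only [if_neg hs, if_neg h1']
              exact ih (stkV tl) (by omega) tl rfl
                (fun pq h => hg pq (List.mem_cons_of_mem _ h)) x y _ (by omega) (by omega)

-- processing the top stack segment equals running A's recursion on that segment
theorem loop_eq_go (k : Nat) : ∀ (p q : Int), (q - p).toNat = k → p ≤ q →
    ∀ (a : List Int) (rest : List (Int × Int)) (n : Nat), stkGood rest →
    stkV ((p, q) :: rest) < n →
    r_shift_loop n a ((p, q) :: rest) = r_shift_loop (stkV rest + 1) (r_shift_go (k + 1) a p q) rest := by
  induction k using Nat.strong_induction_on with
  | _ k ih =>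
    intro p q hk hpq a rest n hg hn
    rw [stkV_cons] at hn
    cases n with
    | zero => omega
    | succ x =>
      by_cases hs : 2 ≤ q - p
      · have hm : PySem.Int.floordiv (p + q) 2 = (p + q) / 2 :=
          PySem.Int.floordiv_eq_ediv_of_pos (by omega)
        have hg2 : stkGood (((p + q) / 2 + 1, q) :: rest) := by
          intro pq hmem
          obtain ⟨u, v⟩ := pq
          simp only [List.mem_cons, Prod.mk.injEq] at hmem
          rcases hmem with ⟨hu, hv⟩ | h
          · show u ≤ v; omega
          · exact hg (u, v) h
        simp only [r_shift_loop]
        rw [if_pos hs, hm]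
        rw [ih ((p + q) / 2 - p).toNat (by omega) p ((p + q) / 2) rfl (by omega) a
          (((p + q) / 2 + 1, q) :: rest) x hg2 (by rw [stkV_cons, stkV_cons]; omega)]
        rw [ih (q - ((p + q) / 2 + 1)).toNat (by omega) ((p + q) / 2 + 1) q rfl (by omega) _
          rest (stkV (((p + q) / 2 + 1, q) :: rest) + 1) hg (by omega)]
        have hgo : r_shift_go (k + 1) a p q
            = r_shift_go ((q - ((p + q) / 2 + 1)).toNat + 1)
                (r_shift_go (((p + q) / 2 - p).toNat + 1) a p ((p + q) / 2)) ((p + q) / 2 + 1) q := by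
          simp only [r_shift_go]
          rw [if_neg (by omega), if_neg (by omega), if_neg (by omega), hm]
          rw [go_congr ((p + q) / 2 - p).toNat p ((p + q) / 2) rfl k
            (((p + q) / 2 - p).toNat + 1) a (by omega) (by omega)]
          exact go_congr ((q - ((p + q) / 2 + 1)).toNat) ((p + q) / 2 + 1) q rfl k
            ((q - ((p + q) / 2 + 1)).toNat + 1) _ (by omega) (by omega)
        rw [hgo]
      · by_cases h1 : q - p = 1
        · simp only [r_shift_loop]
          rw [if_neg hs, if_pos h1]
          have hgo : r_shift_go (k + 1) a p q
              = (let a1 := PySem.List.pySetD a q (PySem.List.pyGetD a p 0)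
                 PySem.List.pySetD a1 p (PySem.List.pyGetD a1 ((a1.length : Int) - 1 - p) 0)) := by
            simp only [r_shift_go]
            rw [if_neg (by omega), if_neg (by omega), if_pos (by omega)]
          rw [hgo]
          exact loop_congr (stkV rest) rest rfl hg x (stkV rest + 1) _ (by omega) (by omega)
        · simp only [r_shift_loop]
          rw [if_neg hs, if_neg h1]
          have hgo : r_shift_go (k + 1) a p q = a := by
            simp only [r_shift_go]
            rw [if_neg (by omega), if_pos (by omega)]
          rw [hgo]
          exact loop_congr (stkV rest) rest rfl hg x (stkV rest + 1) _ (by omega) (by omega)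

-- ===== VERDICT (by name: the statement is the Claim_ definition above) =====
theorem r_shift_spec : Claim_equal_r_shift := by
  intro a i f _ hpre
  unfold Spec_r_shift r_shift r_shift_alt
  have hif : i ≤ f := by rcases hpre with h | h <;> omega
  rw [if_neg (by omega), if_neg (by omega)]
  rw [loop_eq_go (f - i).toNat i f rfl hif a [] (2 * (f - i).toNat + 2)
    (by intro pq h; simp at h) (by rw [stkV_cons, stkV_nil]; omega)]
  simp only [r_shift_loop]
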